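-- pv_equiv track=rewrite | github.com/nanni00/datalake-table-finder | dltf/sloth/utils.py | to_bag
-- ===== SOURCE A (Python) =====
-- def to_bag(table):
--     counter = dict()
--     tuples = [tuple([col[i] for col in table]) for i in range(0, len(table[0]))]
--     for i in range(0, len(tuples)):
--         if tuples[i] in counter:
--             counter[tuples[i]] += 1
--         else:
--             counter[tuples[i]] = 0
--         tuples[i] += (counter[tuples[i]],)
--     return set(tuples)
-- ===== SOURCE B (Python) =====
-- def to_bag(table):
--     rows = [tuple([col[i] for col in table]) for i in range(0, len(table[0]))]
--     positions = {}
--     for i, t in enumerate(rows):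
--         positions.setdefault(t, []).append(i)
--     suffix = {}
--     for idxs in positions.values():
--         for j, i in enumerate(idxs):
--             suffix[i] = j
--     return {rows[i] + (suffix[i],) for i in range(0, len(rows))}
-- ===== Notes on version B (the rewrite author's own statement) =====
-- stated objective: alternative
-- what changed: B replaces A's single online pass that mutates a running counter and rewrites tuples in place by a group-then-scatter scheme: it builds an inverted index from each distinct row to its list of positions, ranks positions within each group with enumerate, and emits each row with its rank suffix.
import Mathlib
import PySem

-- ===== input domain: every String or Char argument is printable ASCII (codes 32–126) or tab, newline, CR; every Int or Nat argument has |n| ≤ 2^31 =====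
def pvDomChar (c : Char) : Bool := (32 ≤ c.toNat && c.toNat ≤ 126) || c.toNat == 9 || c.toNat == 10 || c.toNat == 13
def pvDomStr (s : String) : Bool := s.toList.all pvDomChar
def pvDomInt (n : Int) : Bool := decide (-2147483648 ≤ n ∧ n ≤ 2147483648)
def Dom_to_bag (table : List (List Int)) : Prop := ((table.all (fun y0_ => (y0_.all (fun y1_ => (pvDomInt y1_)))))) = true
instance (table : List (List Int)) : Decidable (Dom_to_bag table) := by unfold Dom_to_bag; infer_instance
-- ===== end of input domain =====

-- B replaces A's online running-counter pass by a group-then-scatter scheme (inverted index of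
-- positions per distinct row, ranks within each group, emission by index); same return value, no speed claim.


-- ===== PORT A =====
-- one loop step of A: look up tuples[i], bump/seed the counter at that key, rewrite tuples[i]
-- (Pre_ guarantees i is in range, so `getD i []` never takes its default; counter.getD t 0 reads
-- a key that was just written, matching Python's counter[tuples[i]])
def tobagStepA (st : PySem.Dict (List Int) Int × List (List Int)) (i : Nat) :
    PySem.Dict (List Int) Int × List (List Int) :=
  let t := st.2.getD i []
  let counter := if st.1.contains t then st.1.modify t 0 (· + 1) else st.1.insert t 0
  (counter, st.2.set i (t ++ [counter.getD t 0]))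

def to_bag (table : List (List Int)) : List (List Int) :=
  -- tuples = [tuple([col[i] for col in table]) for i in range(0, len(table[0]))]
  -- (range(0, n) over n = len(table[0]) ≥ 0 is exactly List.range; col[i] with Pre_ never IndexErrors)
  let tuples := (List.range table.headI.length).map
      (fun i => table.map (fun col => (PySem.List.pyGet? col (i : Int)).getD 0))
  PySem.Set.ofList ((List.range tuples.length).foldl tobagStepA (PySem.Dict.empty, tuples)).2

-- ===== PORT B =====
def to_bag_alt (table : List (List Int)) : List (List Int) :=
  let rows := (List.range table.headI.length).map
      (fun i => table.map (fun col => (PySem.List.pyGet? col (i : Int)).getD 0))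
  -- positions.setdefault(t, []).append(i)  ≡  positions[t] = positions.get(t, []) + [i]
  let positions := (PySem.List.enumerate rows).foldl
      (fun d (p : Int × List Int) => d.modify p.2 [] (· ++ [p.1])) PySem.Dict.empty
  -- for idxs in positions.values(): for j, i in enumerate(idxs): suffix[i] = j
  let suffix := positions.values.foldl
      (fun s g => (PySem.List.enumerate g).foldl (fun s (q : Int × Int) => s.insert q.2 q.1) s)
      (PySem.Dict.empty : PySem.Dict Int Int)
  -- suffix[i] never raises KeyError: every i < len(rows) was indexed into its row's group
  PySem.Set.ofList ((List.range rows.length).map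
      (fun i => rows.getD i [] ++ [suffix.getD (i : Int) 0]))

-- ===== PRECONDITION & SPEC =====
-- exactly the inputs on which the Python A returns: table[0] must exist and every column must be
-- at least as long as the first one (otherwise the transposing comprehension raises IndexError)
def Pre_to_bag (table : List (List Int)) : Prop :=
  table ≠ [] ∧ ∀ col ∈ table, table.headI.length ≤ col.length
instance (table : List (List Int)) : Decidable (Pre_to_bag table) := by unfold Pre_to_bag; infer_instance
def pvWitness_to_bag : List (List Int) := [[1, 1, 2], [3, 3, 3]]
def Spec_to_bag (table : List (List Int)) (out : List (List Int)) : Prop := out = to_bag_alt table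
instance (table : List (List Int)) (out : List (List Int)) : Decidable (Spec_to_bag table out) := by unfold Spec_to_bag; infer_instance

-- ===== CLAIM (what is proved, stated in full; the proofs are below) =====
def Claim_equal_to_bag : Prop := ∀ (table : List (List Int)), Dom_to_bag table → Pre_to_bag table → Spec_to_bag table (to_bag table)

-- ===== LEMMAS AND PROOFS =====

-- the annotation both programs compute for index i of a row list:
-- the row followed by its multiplicity in the strict prefix
def annotB (rows : List (List Int)) (i : Nat) : List Int :=
  rows.getD i [] ++ [((rows.take i).count (rows.getD i []) : Int)]

-- ---------- A's loop computes annotB ----------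

lemma set_append_length {A : Type} (xs ys : List A) (v : A) :
    (xs ++ ys).set xs.length v = xs ++ ys.set 0 v := by
  induction xs with
  | nil => simp
  | cons a xs ih => simp [ih]

lemma loopA_inv (rows : List (List Int)) :
    ∀ k, k ≤ rows.length →
      (∀ t, (((List.range k).foldl tobagStepA (PySem.Dict.empty, rows)).1.contains t
               = decide (t ∈ rows.take k))
        ∧ (((List.range k).foldl tobagStepA (PySem.Dict.empty, rows)).1.getD t 0
               = if t ∈ rows.take k then ((rows.take k).count t : Int) - 1 else 0))
      ∧ ((List.range k).foldl tobagStepA (PySem.Dict.empty, rows)).2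
          = (List.range k).map (annotB rows) ++ rows.drop k := by
  intro k
  induction k with
  | zero =>
    intro _
    exact ⟨fun t => by simp [PySem.Dict.contains_empty, PySem.Dict.getD_empty], by simp⟩
  | succ k ih =>
    intro hk
    obtain ⟨hct, hl⟩ := ih (Nat.le_of_succ_le hk)
    have hklt : k < rows.length := hk
    have hget' : rows[k]? = some rows[k] := List.getElem?_eq_getElem hklt
    have htake : rows.take (k + 1) = rows.take k ++ [rows[k]] := by
      rw [List.take_add_one]; simp [hget']
    have hdrop : rows.drop k = rows[k] :: rows.drop (k + 1) := List.drop_eq_getElem_cons hklt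
    have hmem1 : ∀ t : List Int, t ∈ rows.take (k + 1) ↔ t ∈ rows.take k ∨ t = rows[k] := by
      intro t; rw [htake, List.mem_append, List.mem_singleton]
    have hcount1 : ∀ t : List Int,
        (rows.take (k + 1)).count t = (rows.take k).count t + (if t = rows[k] then 1 else 0) := by
      intro t
      rw [htake, List.count_append]
      by_cases h : t = rows[k]
      · subst h; simp
      · simp [h, Ne.symm h]
    rw [List.range_succ, List.foldl_append]
    set S := (List.range k).foldl tobagStepA (PySem.Dict.empty, rows) with hS
    have hlen : ((List.range k).map (annotB rows)).length = k := by simp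
    have ht : S.2.getD k [] = rows[k] := by
      rw [hl, List.getD, List.getElem?_append_right (le_of_eq hlen), hlen, hdrop]
      simp [hget']
    have hsetfold : ∀ v, S.2.set k v = (List.range k).map (annotB rows) ++ v :: rows.drop (k + 1) := by
      intro v
      have h2 := set_append_length ((List.range k).map (annotB rows)) (rows.drop k) v
      rw [hlen] at h2
      rw [hl, h2, hdrop, List.set_cons_zero]
    have hannot : annotB rows k = rows[k] ++ [((rows.take k).count rows[k] : Int)] := by
      simp [annotB, List.getD, hget']
    by_cases hmem : rows[k] ∈ rows.take k
    · -- seen before: the loop body takes the modify branch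
      have hcon : S.1.contains rows[k] = true := by rw [(hct _).1]; simpa using hmem
      have hval : (S.1.modify rows[k] 0 (· + 1)).getD rows[k] 0 = ((rows.take k).count rows[k] : Int) := by
        rw [PySem.Dict.getD_modify]
        simp [(hct rows[k]).2, hmem]
      have hstep : List.foldl tobagStepA S [k]
          = (S.1.modify rows[k] 0 (· + 1),
             S.2.set k (rows[k] ++ [(S.1.modify rows[k] 0 (· + 1)).getD rows[k] 0])) := by
        simp only [List.foldl, tobagStepA, ht]
        rw [if_pos hcon]
      rw [hstep]
      refine ⟨fun t => ⟨?_, ?_⟩, ?_⟩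
      · rw [PySem.Dict.contains_modify, (hct t).1]
        by_cases h : t = rows[k] <;> simp [h, hmem1]
      · rw [PySem.Dict.getD_modify]
        by_cases h : t = rows[k]
        · rw [if_pos h, h, (hct rows[k]).2, if_pos hmem,
             if_pos ((hmem1 rows[k]).mpr (Or.inr rfl)), hcount1 rows[k], if_pos rfl]
          push_cast; ring
        · rw [if_neg h, (hct t).2, hcount1 t, if_neg h]
          simp [hmem1, h]
      · rw [hval, hsetfold]
        simp [hannot]
    · -- first occurrence: the loop body takes the insert branch
      have hcon : S.1.contains rows[k] = false := by rw [(hct _).1]; simpa using hmem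
      have hcnt0 : (rows.take k).count rows[k] = 0 := List.count_eq_zero.mpr hmem
      have hval : (S.1.insert rows[k] 0).getD rows[k] 0 = ((rows.take k).count rows[k] : Int) := by
        rw [PySem.Dict.getD_insert]
        simp [hcnt0]
      have hstep : List.foldl tobagStepA S [k]
          = (S.1.insert rows[k] 0,
             S.2.set k (rows[k] ++ [(S.1.insert rows[k] 0).getD rows[k] 0])) := by
        simp only [List.foldl, tobagStepA, ht]
        rw [if_neg (by simp [hcon])]
      rw [hstep]
      refine ⟨fun t => ⟨?_, ?_⟩, ?_⟩
      · rw [PySem.Dict.contains_insert, (hct t).1]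
        by_cases h : t = rows[k] <;> simp [h, hmem1]
      · rw [PySem.Dict.getD_insert]
        by_cases h : t = rows[k]
        · rw [if_pos h, h, if_pos ((hmem1 rows[k]).mpr (Or.inr rfl)), hcount1 rows[k], if_pos rfl]
          simp [hcnt0]
        · rw [if_neg h, (hct t).2, hcount1 t, if_neg h]
          simp [hmem1, h]
      · rw [hval, hsetfold]
        simp [hannot]

lemma loopA_final (rows : List (List Int)) :
    ((List.range rows.length).foldl tobagStepA (PySem.Dict.empty, rows)).2
      = (List.range rows.length).map (annotB rows) := by
  have h := (loopA_inv rows rows.length le_rfl).2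
  simpa using h

-- ---------- B's grouping computes annotB ----------

-- indices (as Python ints) of the occurrences of t in rows, starting from index s
def grpS (rows : List (List Int)) (s : Int) (t : List Int) : List Int :=
  ((PySem.List.enumerate rows s).filter (fun p => p.2 == t)).map (·.1)

-- the inner insert step of B's second loop
def insStep (s : PySem.Dict Int Int) (q : Int × Int) : PySem.Dict Int Int := s.insert q.2 q.1

lemma grpS_cons (r : List Int) (rows : List (List Int)) (s : Int) (t : List Int) :
    grpS (r :: rows) s t = (if r = t then [s] else []) ++ grpS rows (s + 1) t := by
  unfold grpS
  rw [PySem.List.enumerate_cons, List.filter_cons]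
  by_cases h : r = t <;> simp [h]

lemma grpS_append (xs ys : List (List Int)) (s : Int) (t : List Int) :
    grpS (xs ++ ys) s t = grpS xs s t ++ grpS ys (s + xs.length) t := by
  unfold grpS
  rw [PySem.List.enumerate_append, List.filter_append, List.map_append]

lemma length_grpS (rows : List (List Int)) (s : Int) (t : List Int) :
    (grpS rows s t).length = rows.count t := by
  induction rows generalizing s with
  | nil => simp [grpS]
  | cons r rows ih =>
    rw [grpS_cons, List.length_append, ih, List.count_cons]
    by_cases h : r = t <;> simp [h, Nat.add_comm]

lemma mem_grpS_ge (rows : List (List Int)) (s : Int) (t : List Int) :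
    ∀ j ∈ grpS rows s t, s ≤ j := by
  intro j hj
  unfold grpS at hj
  obtain ⟨p, hp, rfl⟩ := List.mem_map.mp hj
  obtain ⟨k, _, rfl⟩ := (PySem.List.mem_enumerate_iff _ _ _).mp (List.mem_of_mem_filter hp)
  omega

lemma mem_grpS_row (rows : List (List Int)) (s : Int) (t : List Int) (j : Int)
    (hj : j ∈ grpS rows s t) : ∃ k, ∃ _ : k < rows.length, j = s + k ∧ rows[k] = t := by
  unfold grpS at hj
  obtain ⟨p, hp, rfl⟩ := List.mem_map.mp hj
  have hmem := List.mem_of_mem_filter hp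
  have hfil := List.of_mem_filter hp
  obtain ⟨k, hk, rfl⟩ := (PySem.List.mem_enumerate_iff _ _ _).mp hmem
  exact ⟨k, hk, rfl, by simpa using hfil⟩

-- a run of B's inner loop over a group not containing i leaves suffix[i] unchanged
lemma inner_skip (g : List Int) (s0 : Int) (d : PySem.Dict Int Int) (i : Int) (h : i ∉ g) :
    ((PySem.List.enumerate g s0).foldl insStep d).get? i = d.get? i := by
  induction g generalizing s0 d with
  | nil => simp [PySem.List.enumerate_nil]
  | cons x g ih =>
    rw [PySem.List.enumerate_cons]
    simp only [List.foldl]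
    rw [ih _ _ (fun hm => h (List.mem_cons_of_mem _ hm)),
        insStep, PySem.Dict.get?_insert_of_ne _ _ (by intro he; exact h (he ▸ List.mem_cons_self))]

-- processing the group pre ++ i :: suf with i ∉ suf sets suffix[i] to its rank in the group
lemma inner_hit (pre suf : List Int) (i : Int) (s0 : Int) (d : PySem.Dict Int Int)
    (h : i ∉ suf) :
    ((PySem.List.enumerate (pre ++ i :: suf) s0).foldl insStep d).get? i
      = some (s0 + pre.length) := by
  rw [PySem.List.enumerate_append, List.foldl_append, PySem.List.enumerate_cons]
  simp only [List.foldl]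
  rw [inner_skip _ _ _ _ h, insStep, PySem.Dict.get?_insert_self]

-- outer loop over groups f t for t in K, none of whose groups contains i
lemma outer_skip_map (K : List (List Int)) (f : List Int → List Int) (d : PySem.Dict Int Int)
    (i : Int) (h : ∀ t ∈ K, i ∉ f t) :
    (K.foldl (fun s t => (PySem.List.enumerate (f t) 0).foldl insStep s) d).get? i = d.get? i := by
  induction K generalizing d with
  | nil => rfl
  | cons t K ih =>
    simp only [List.foldl]
    rw [ih _ (fun t' ht' => h t' (List.mem_cons_of_mem _ ht')),
        inner_skip _ _ _ _ (h t List.mem_cons_self)]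

-- decomposition of i's own group: indices below i first, then i, then indices above i
lemma grp_split (rows : List (List Int)) (i : Nat) (hi : i < rows.length)
    (t : List Int) (ht : rows[i] = t) :
    grpS rows 0 t
      = grpS (rows.take i) 0 t ++ (i : Int) :: grpS (rows.drop (i + 1)) (i + 1) t := by
  conv_lhs => rw [← List.take_append_drop i rows]
  rw [grpS_append, List.drop_eq_getElem_cons hi, grpS_cons, ht, if_pos rfl]
  have hlen : (rows.take i).length = i := List.length_take_of_le (le_of_lt hi)
  rw [hlen]
  simp

-- B's suffix dict holds the prefix count at every index of rows
lemma suffix_getD (rows : List (List Int)) (i : Nat) (hi : i < rows.length) :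
    ((((PySem.List.enumerate rows 0).foldl
          (fun d (p : Int × List Int) => d.modify p.2 [] (· ++ [p.1])) PySem.Dict.empty).values).foldl
        (fun s g => (PySem.List.enumerate g 0).foldl insStep s)
        (PySem.Dict.empty : PySem.Dict Int Int)).getD (i : Int) 0
      = ((rows.take i).count rows[i] : Int) := by
  set positions := (PySem.List.enumerate rows 0).foldl
      (fun d (p : Int × List Int) => d.modify p.2 [] (· ++ [p.1])) PySem.Dict.empty with hposdef
  -- the positions dict: keys are the distinct rows, value at t is the index list of t
  have hkeys : positions.keys = PySem.Set.ofList rows := by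
    rw [hposdef,
        PySem.Dict.keys_foldl_modify_key (PySem.List.enumerate rows 0) (fun p => p.2) []
          (fun d p => (· ++ [p.1])) PySem.Dict.empty]
    rw [PySem.Dict.keys_empty, PySem.Set.update_nil_left, PySem.List.map_snd_enumerate]
  have hnodup : positions.keys.Nodup := by
    rw [hkeys]; exact PySem.Set.nodup_ofList rows
  have hgetD : ∀ t, positions.getD t [] = grpS rows 0 t := by
    intro t
    have hswap : positions
        = ((PySem.List.enumerate rows 0).map (fun p : Int × List Int => (p.2, p.1))).foldl
            (fun d (p : List Int × Int) => d.modify p.1 [] (· ++ [p.2])) PySem.Dict.empty := by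
      rw [hposdef, List.foldl_map]
    rw [hswap, PySem.Dict.getD_foldl_modify_append]
    unfold grpS
    rw [PySem.Dict.getD_empty]
    simp [List.filter_map, List.map_map, Function.comp_def]
  have hvals : positions.values = (PySem.Set.ofList rows).map (fun t => grpS rows 0 t) := by
    rw [PySem.Dict.values_eq_map_keys positions hnodup [], hkeys]
    exact List.map_congr_left (fun t _ => hgetD t)
  rw [hvals, List.foldl_map]
  -- split the distinct-row list at rows[i]
  have hti : rows[i] ∈ PySem.Set.ofList rows := by
    rw [PySem.Set.mem_ofList]; exact List.getElem_mem hi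
  obtain ⟨K1, K2, hK⟩ := List.append_of_mem hti
  have hnd : (K1 ++ rows[i] :: K2).Nodup := hK ▸ PySem.Set.nodup_ofList rows
  have hK2 : rows[i] ∉ K2 := by
    have := (List.nodup_append.mp hnd).2.1
    exact (List.nodup_cons.mp this).1
  rw [hK, List.foldl_append, List.foldl_cons]
  -- groups after rows[i]'s do not contain index i
  have hskip : ∀ t ∈ K2, (i : Int) ∉ grpS rows 0 t := by
    intro t htK hmem
    obtain ⟨k, hk, hki, hrk⟩ := mem_grpS_row rows 0 t (i : Int) hmem
    have : k = i := by omega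
    subst this
    exact hK2 (hrk ▸ htK)
  rw [PySem.Dict.getD_eq_get?_getD, outer_skip_map K2 (fun t => grpS rows 0 t) _ (i : Int) hskip]
  -- the group of rows[i] itself: i sits after its prefix occurrences
  have hsuf : (i : Int) ∉ grpS (rows.drop (i + 1)) (i + 1) rows[i] := by
    intro hmem
    have := mem_grpS_ge _ _ _ _ hmem
    omega
  rw [grp_split rows i hi rows[i] rfl, inner_hit _ _ _ _ _ hsuf, length_grpS]
  simp

-- B's emitted list is the annotated list
lemma listB_eq (rows : List (List Int)) :
    (List.range rows.length).map
        (fun i => rows.getD i [] ++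
          [((((PySem.List.enumerate rows 0).foldl
                (fun d (p : Int × List Int) => d.modify p.2 [] (· ++ [p.1])) PySem.Dict.empty).values).foldl
              (fun s g => (PySem.List.enumerate g 0).foldl insStep s)
              (PySem.Dict.empty : PySem.Dict Int Int)).getD (i : Int) 0])
      = (List.range rows.length).map (annotB rows) := by
  apply List.map_congr_left
  intro i hi
  have hlt : i < rows.length := List.mem_range.mp hi
  rw [suffix_getD rows i hlt, annotB, List.getD, List.getElem?_eq_getElem hlt]
  simp

-- ===== VERDICT (by name: the statement is the Claim_ definition above) =====
theorem to_bag_spec : Claim_equal_to_bag := by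
  intro table _ _
  unfold Spec_to_bag to_bag to_bag_alt
  simp only []
  rw [loopA_final]
  exact congrArg PySem.Set.ofList (listB_eq _).symm
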